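-- pv_equiv track=rewrite | github.com/EntropyConcept/techfriend | post_stats.py | get_count_of_style_changes
-- ===== SOURCE A (Python) =====
-- from typing import Union, List, Dict, Tuple
--
-- def get_count_of_style_changes(styles: List[str]) -> int:
--     if styles == []:
--         return 0
--
--     changes_count = 0
--     current_style = styles[0]
--
--     for style in styles[1:]:
--         if style == 'skip':
--             continue
--
--         if style != current_style:  # Если стиль изменился
--             changes_count += 1
--             current_style = style  # Обновляем текущий стиль
--
--     return changes_count
-- ===== SOURCE B (Python) =====
-- def get_count_of_style_changes(styles):
--     # Filter-then-pairwise decomposition: keep styles[0] unconditionally,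
--     # drop 'skip' from the rest, count adjacent differing pairs.
--     if not styles:
--         return 0
--     seq = [styles[0]] + [s for s in styles[1:] if s != 'skip']
--     return sum(1 for a, b in zip(seq, seq[1:]) if a != b)
-- ===== Notes on version B (the rewrite author's own statement) =====
-- stated objective: alternative
-- what changed: Replaces A's single stateful scan carrying a mutable current_style with a two-stage pipeline: filter out 'skip' (keeping the head unconditionally), then count adjacent differing pairs via zip.
import Mathlib
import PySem

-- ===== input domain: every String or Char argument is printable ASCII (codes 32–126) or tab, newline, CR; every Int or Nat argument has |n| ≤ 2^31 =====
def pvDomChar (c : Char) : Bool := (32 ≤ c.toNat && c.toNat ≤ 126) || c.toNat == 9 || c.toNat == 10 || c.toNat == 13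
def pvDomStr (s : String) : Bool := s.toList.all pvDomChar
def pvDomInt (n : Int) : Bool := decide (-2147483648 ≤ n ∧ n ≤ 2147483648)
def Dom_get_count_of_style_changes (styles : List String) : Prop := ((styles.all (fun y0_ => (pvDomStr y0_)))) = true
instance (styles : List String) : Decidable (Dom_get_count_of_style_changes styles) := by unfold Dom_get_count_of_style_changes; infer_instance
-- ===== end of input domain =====

-- B replaces A's single stateful scan with a filter-then-pairwise-compare pipeline (same cost; alternative decomposition).


-- ===== PORT A =====
-- A's loop: state (changes_count, current_style), skipping 'skip'
def pvALoop : List String → Int → String → Int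
  | [], c, _ => c
  | s :: t, c, cur =>
    if s = "skip" then pvALoop t c cur
    else if s ≠ cur then pvALoop t (c + 1) s
    else pvALoop t c cur

def get_count_of_style_changes (styles : List String) : Int :=
  match styles with
  | [] => 0
  | h :: t => pvALoop t 0 h

-- ===== PORT B =====
-- sum(1 for a, b in zip(seq, seq[1:]) if a != b)
def pvPairCount (seq : List String) : Int :=
  (((seq.zip seq.tail).filter (fun p => p.1 ≠ p.2)).length : Int)

def get_count_of_style_changes_alt (styles : List String) : Int :=
  match styles with
  | [] => 0
  | h :: t => pvPairCount (h :: t.filter (fun s => s ≠ "skip"))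

-- ===== PRECONDITION & SPEC =====
def Spec_get_count_of_style_changes (styles : List String) (out : Int) : Prop := out = get_count_of_style_changes_alt styles
instance (styles : List String) (out : Int) : Decidable (Spec_get_count_of_style_changes styles out) := by unfold Spec_get_count_of_style_changes; infer_instance

-- ===== CLAIM (what is proved, stated in full; the proofs are below) =====
def Claim_equal_get_count_of_style_changes : Prop := ∀ (styles : List String), Dom_get_count_of_style_changes styles → Spec_get_count_of_style_changes styles (get_count_of_style_changes styles)

-- ===== LEMMAS AND PROOFS =====
theorem pvPairCount_cons (a b : String) (t : List String) :
    pvPairCount (a :: b :: t) = (if a ≠ b then 1 else 0) + pvPairCount (b :: t) := by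
  simp only [pvPairCount, List.zip, List.tail, List.zipWith, List.filter]
  split_ifs with h <;> simp_all <;> push_cast <;> ring

theorem pvALoop_eq (t : List String) (c : Int) (cur : String) :
    pvALoop t c cur = c + pvPairCount (cur :: t.filter (fun s => s ≠ "skip")) := by
  induction t generalizing c cur with
  | nil => simp [pvALoop, pvPairCount]
  | cons s t ih =>
    by_cases hs : s = "skip"
    · simp [pvALoop, hs, ih]
    · by_cases hc : s = cur
      · subst hc
        simp [pvALoop, hs, List.filter, ih, pvPairCount_cons]
      · have hne : s ≠ cur := hc
        simp only [pvALoop, if_neg hs, ne_eq, hne, not_false_iff, if_pos]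
        rw [ih]
        have : (s :: t).filter (fun s => decide ¬(s = "skip")) = s :: t.filter (fun s => decide ¬(s = "skip")) := by
          simp [List.filter, hs]
        simp only [ne_eq, this, pvPairCount_cons]
        have : cur ≠ s := fun h => hne h.symm
        simp [this]
        ring

-- ===== VERDICT (by name: the statement is the Claim_ definition above) =====
theorem get_count_of_style_changes_spec : Claim_equal_get_count_of_style_changes := by
  intro styles _
  unfold Spec_get_count_of_style_changes get_count_of_style_changes get_count_of_style_changes_alt
  cases styles with
  | nil => rfl
  | cons h t => simp only []; rw [pvALoop_eq]; ring
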